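-- pv_equiv track=rewrite | github.com/Mrtinic489/Png | Chunks/IDAT.py | filter_1
-- ===== SOURCE A (Python) =====
-- def filter_1(current):
--     result_line = []
--     for i in range(len(current)):
--         result_pixel = []
--         for j in range(len(current[i])):
--             if i > 0:
--                 result_pixel.append(
--                     (current[i][j] + (result_line[i - 1][j])) % 256)
--             else:
--                 result_pixel.append(current[i][j])
--         result_line.append(result_pixel)
--     return result_line
-- ===== SOURCE B (Python) =====
-- def filter_1(current):
--     # Closed form: cell (i, j) of the output is the column prefix sum
--     # sum(current[k][j] for k <= i) % 256; row 0 is copied verbatim.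
--     out = []
--     for i, row in enumerate(current):
--         if i == 0:
--             out.append(list(row))
--         else:
--             out.append([sum(current[k][j] for k in range(i + 1)) % 256
--                         for j in range(len(row))])
--     return out
-- ===== Notes on version B (the rewrite author's own statement) =====
-- stated objective: alternative
-- what changed: B replaces A's sequential recurrence on the previous output row by a closed form: each cell (i,j) is computed directly as the column prefix sum sum(current[k][j] for k<=i) % 256, never reading the output being built.
import Mathlib
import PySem

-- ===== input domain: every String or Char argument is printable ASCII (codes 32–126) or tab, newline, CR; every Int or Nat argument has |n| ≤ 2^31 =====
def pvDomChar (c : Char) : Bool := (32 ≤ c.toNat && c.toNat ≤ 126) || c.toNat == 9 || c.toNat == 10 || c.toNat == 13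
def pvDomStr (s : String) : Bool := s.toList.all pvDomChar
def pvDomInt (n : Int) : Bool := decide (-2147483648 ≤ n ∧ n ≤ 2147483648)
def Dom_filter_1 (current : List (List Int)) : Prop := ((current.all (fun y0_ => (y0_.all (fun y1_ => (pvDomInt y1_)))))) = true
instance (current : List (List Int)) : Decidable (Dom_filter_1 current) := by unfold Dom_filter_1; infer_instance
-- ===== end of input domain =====

-- B computes each cell by a closed form (column prefix sum mod 256) instead of
-- A's recurrence reading the previously built output row; alternative, not faster.

-- ===== PORT A =====
-- literal transliteration of A: outer loop over range(len(current)), inner loop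
-- over range(len(current[i])), appending, indexing result_line[i-1][j].
def filter_1 (current : List (List Int)) : List (List Int) :=
  (PySem.List.pyRange 0 (current.length : Int) 1).foldl (fun result_line i =>
    let result_pixel :=
      (PySem.List.pyRange 0 ((PySem.List.pyGetD current i []).length : Int) 1).foldl
        (fun rp j =>
          if i > 0 then
            rp ++ [PySem.Int.mod
              (PySem.List.pyGetD (PySem.List.pyGetD current i []) j 0 +
               PySem.List.pyGetD (PySem.List.pyGetD result_line (i - 1) []) j 0) 256]
          else
            rp ++ [PySem.List.pyGetD (PySem.List.pyGetD current i []) j 0]) []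
    result_line ++ [result_pixel]) []

-- ===== PORT B =====
-- the row built for index i: copy for i == 0, otherwise the comprehension
-- [sum(current[k][j] for k in range(i+1)) % 256 for j in range(len(row))]
def pvBRow (current : List (List Int)) (i : Int) (row : List Int) : List Int :=
  if i == 0 then row
  else
    (PySem.List.pyRange 0 (row.length : Int) 1).map (fun j =>
      PySem.Int.mod
        ((PySem.List.pyRange 0 (i + 1) 1).foldl
          (fun s k => s + PySem.List.pyGetD (PySem.List.pyGetD current k []) j 0) 0)
        256)

-- for i, row in enumerate(current): out.append(...)
def filter_1_alt (current : List (List Int)) : List (List Int) :=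
  (PySem.List.enumerate current).foldl
    (fun out p => out ++ [pvBRow current p.1 p.2]) []

-- ===== PRECONDITION & SPEC =====
-- Pre_ excludes exactly the ragged inputs where some row is longer than the row
-- before it: there both Pythons raise IndexError (A on result_line[i-1][j], B on current[k][j]).
def Pre_filter_1 (current : List (List Int)) : Prop :=
  ((current.zip current.tail).all (fun p => p.2.length ≤ p.1.length)) = true
instance (current : List (List Int)) : Decidable (Pre_filter_1 current) := by
  unfold Pre_filter_1; infer_instance
def pvWitness_filter_1 : List (List Int) := [[1, 2], [3, 4], [255]]
def Spec_filter_1 (current : List (List Int)) (out : List (List Int)) : Prop := out = filter_1_alt current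
instance (current : List (List Int)) (out : List (List Int)) : Decidable (Spec_filter_1 current out) := by unfold Spec_filter_1; infer_instance

-- ===== CLAIM (what is proved, stated in full; the proofs are below) =====
def Claim_equal_filter_1 : Prop := ∀ (current : List (List Int)), Dom_filter_1 current → Pre_filter_1 current → Spec_filter_1 current (filter_1 current)

-- ===== LEMMAS AND PROOFS =====

-- proof-side helper: the column prefix sum B's comprehension folds up
def pvPref (c : List (List Int)) (j : Int) (i : Int) : Int :=
  (PySem.List.pyRange 0 (i + 1) 1).foldl
    (fun s k => s + PySem.List.pyGetD (PySem.List.pyGetD c k []) j 0) 0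

lemma pvBRow_eq (c : List (List Int)) (i : Int) (row : List Int) :
    pvBRow c i row = if i == 0 then row else
      (PySem.List.pyRange 0 (row.length : Int) 1).map
        (fun j => PySem.Int.mod (pvPref c j i) 256) := rfl

lemma pref_zero (c : List (List Int)) (j : Int) :
    pvPref c j 0 = PySem.List.pyGetD (PySem.List.pyGetD c 0 []) j 0 := by
  unfold pvPref
  norm_num
  rw [show PySem.List.pyRange (0 : Int) 1 1 = [0] from by decide]
  simp

lemma pref_succ (c : List (List Int)) (j : Int) (i : Nat) :
    pvPref c j ((i + 1 : Nat) : Int) =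
      pvPref c j (i : Int) +
        PySem.List.pyGetD (PySem.List.pyGetD c ((i + 1 : Nat) : Int) []) j 0 := by
  unfold pvPref
  have h : ((i + 1 : Nat) : Int) + 1 = (((i : Nat) : Int) + 1) + 1 := by push_cast; ring
  rw [h, PySem.List.pyRange_one_succ_right (by positivity), List.foldl_append]
  simp

lemma pre_cons (a b : List Int) (t : List (List Int)) (h : Pre_filter_1 (a :: b :: t)) :
    b.length ≤ a.length ∧ Pre_filter_1 (b :: t) := by
  unfold Pre_filter_1 at *
  simp_all

lemma pre_adj (c : List (List Int)) (h : Pre_filter_1 c) (p : Nat) (hp : p + 1 < c.length) :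
    (c.getD (p + 1) []).length ≤ (c.getD p []).length := by
  induction c generalizing p with
  | nil => simp at hp
  | cons a l ih =>
    cases l with
    | nil => simp at hp
    | cons b t =>
      obtain ⟨h1, h2⟩ := pre_cons a b t h
      cases p with
      | zero => simpa using h1
      | succ q =>
        have := ih h2 q (by simpa using hp)
        simpa using this

lemma getD_natCast (c : List (List Int)) (m : Nat) :
    PySem.List.pyGetD c ((m : Nat) : Int) [] = c.getD m [] := by
  rw [PySem.List.pyGetD_natCast]

-- inner loop of A, i = 0 branch: identity copy of the row
lemma inner_zero (current result_line : List (List Int)) :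
    (PySem.List.pyRange 0 ((PySem.List.pyGetD current (0 : Int) []).length : Int) 1).foldl
        (fun rp j =>
          if (0 : Int) > 0 then
            rp ++ [PySem.Int.mod
              (PySem.List.pyGetD (PySem.List.pyGetD current (0 : Int) []) j 0 +
               PySem.List.pyGetD (PySem.List.pyGetD result_line ((0 : Int) - 1) []) j 0) 256]
          else
            rp ++ [PySem.List.pyGetD (PySem.List.pyGetD current (0 : Int) []) j 0]) [] =
      PySem.List.pyGetD current (0 : Int) [] := by
  have h : ∀ rp j, (if (0 : Int) > 0 then
            rp ++ [PySem.Int.mod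
              (PySem.List.pyGetD (PySem.List.pyGetD current (0 : Int) []) j 0 +
               PySem.List.pyGetD (PySem.List.pyGetD result_line ((0 : Int) - 1) []) j 0) 256]
          else
            rp ++ [PySem.List.pyGetD (PySem.List.pyGetD current (0 : Int) []) j 0]) =
          rp ++ [PySem.List.pyGetD (PySem.List.pyGetD current (0 : Int) []) j 0] := by
    intro rp j; simp
  simp only [h, PySem.List.foldl_append_singleton_eq_map, List.nil_append]
  exact PySem.List.map_pyGetD_pyRange_zero' _ _

-- inner loop of A, i > 0 branch, as a map
lemma inner_pos (current result_line : List (List Int)) (i : Int) (hi : i > 0) :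
    (PySem.List.pyRange 0 ((PySem.List.pyGetD current i []).length : Int) 1).foldl
        (fun rp j =>
          if i > 0 then
            rp ++ [PySem.Int.mod
              (PySem.List.pyGetD (PySem.List.pyGetD current i []) j 0 +
               PySem.List.pyGetD (PySem.List.pyGetD result_line (i - 1) []) j 0) 256]
          else
            rp ++ [PySem.List.pyGetD (PySem.List.pyGetD current i []) j 0]) [] =
      (PySem.List.pyRange 0 ((PySem.List.pyGetD current i []).length : Int) 1).map
        (fun j => PySem.Int.mod
              (PySem.List.pyGetD (PySem.List.pyGetD current i []) j 0 +
               PySem.List.pyGetD (PySem.List.pyGetD result_line (i - 1) []) j 0) 256) := by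
  have h : ∀ rp j, (if i > 0 then
            rp ++ [PySem.Int.mod
              (PySem.List.pyGetD (PySem.List.pyGetD current i []) j 0 +
               PySem.List.pyGetD (PySem.List.pyGetD result_line (i - 1) []) j 0) 256]
          else
            rp ++ [PySem.List.pyGetD (PySem.List.pyGetD current i []) j 0]) =
          rp ++ [PySem.Int.mod
              (PySem.List.pyGetD (PySem.List.pyGetD current i []) j 0 +
               PySem.List.pyGetD (PySem.List.pyGetD result_line (i - 1) []) j 0) 256] := by
    intro rp j; simp [hi]
  simp only [h, PySem.List.foldl_append_singleton_eq_map, List.nil_append]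

lemma alt_eq_map (c : List (List Int)) :
    filter_1_alt c = (PySem.List.enumerate c).map (fun p => pvBRow c p.1 p.2) := by
  unfold filter_1_alt
  rw [PySem.List.foldl_append_singleton_eq_map]
  simp

-- the cell A computes at row p+1, column j, equals B's closed form
lemma step_cell (c : List (List Int)) (p : Nat)
    (hlen : (c.getD (p + 1) []).length ≤ (c.getD p []).length)
    (j : Int) (hj0 : 0 ≤ j) (hj : j < ((c.getD (p + 1) []).length : Int)) :
    PySem.Int.mod
      (PySem.List.pyGetD (c.getD (p + 1) []) j 0 +
       PySem.List.pyGetD (pvBRow c ((p : Nat) : Int) (c.getD p [])) j 0) 256 =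
    PySem.Int.mod (pvPref c j ((p + 1 : Nat) : Int)) 256 := by
  have hstep := pref_succ c j p
  rw [getD_natCast c (p + 1)] at hstep
  rcases Nat.eq_zero_or_pos p with hp0 | hppos
  · subst hp0
    have h0 : pvBRow c ((0 : Nat) : Int) (c.getD 0 []) = c.getD 0 [] := by simp [pvBRow]
    rw [h0, hstep]
    simp only [Nat.cast_zero]
    rw [pref_zero]
    have hc0 : PySem.List.pyGetD c (0 : Int) [] = c.getD 0 [] := PySem.List.pyGetD_zero c []
    rw [hc0]
    rw [PySem.Int.mod_eq_emod_of_pos (by norm_num), PySem.Int.mod_eq_emod_of_pos (by norm_num)]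
    rw [Int.add_comm]
  · have hpne : (((p : Nat) : Int) == 0) = false := by simp; omega
    have hb : pvBRow c ((p : Nat) : Int) (c.getD p []) =
        (PySem.List.pyRange 0 ((c.getD p []).length : Int) 1).map
          (fun j => PySem.Int.mod (pvPref c j ((p : Nat) : Int)) 256) := by
      rw [pvBRow_eq, hpne]; simp
    rw [hb]
    have hjlt : j < ((c.getD p []).length : Int) := by
      have : ((c.getD (p + 1) []).length : Int) ≤ ((c.getD p []).length : Int) := by
        exact_mod_cast hlen
      omega
    rw [PySem.List.pyGetD_map_pyRange_of_nonneg _ _ _ _ hj0 hjlt, hstep]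
    rw [PySem.Int.mod_eq_emod_of_pos (by norm_num), PySem.Int.mod_eq_emod_of_pos (by norm_num),
        PySem.Int.mod_eq_emod_of_pos (by norm_num)]
    omega

-- the row A appends at step m equals B's row for index m
lemma row_eq (c : List (List Int)) (hpre : Pre_filter_1 c) (m : Nat) (hm : m < c.length) :
    (PySem.List.pyRange 0 ((PySem.List.pyGetD c ((m : Nat) : Int) []).length : Int) 1).foldl
        (fun rp j =>
          if ((m : Nat) : Int) > 0 then
            rp ++ [PySem.Int.mod
              (PySem.List.pyGetD (PySem.List.pyGetD c ((m : Nat) : Int) []) j 0 +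
               PySem.List.pyGetD (PySem.List.pyGetD
                 ((PySem.List.enumerate (c.take m)).map (fun p => pvBRow c p.1 p.2))
                 (((m : Nat) : Int) - 1) []) j 0) 256]
          else
            rp ++ [PySem.List.pyGetD (PySem.List.pyGetD c ((m : Nat) : Int) []) j 0]) [] =
      pvBRow c ((m : Nat) : Int) (c.getD m []) := by
  cases m with
  | zero =>
    simp only [Nat.cast_zero]
    rw [inner_zero]
    simp [pvBRow, PySem.List.pyGetD_zero]
  | succ p =>
    have hmpos : (((p + 1 : Nat) : Nat) : Int) > 0 := by positivity
    rw [inner_pos _ _ _ hmpos]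
    rw [getD_natCast c (p + 1)]
    have hRL : PySem.List.pyGetD
        ((PySem.List.enumerate (c.take (p + 1))).map (fun q => pvBRow c q.1 q.2))
        (((p + 1 : Nat) : Int) - 1) [] = pvBRow c ((p : Nat) : Int) (c.getD p []) := by
      have hcast : (((p + 1 : Nat) : Int) - 1) = ((p : Nat) : Int) := by push_cast; ring
      rw [hcast, PySem.List.pyGetD_natCast]
      have hplen : p < ((PySem.List.enumerate (c.take (p + 1))).map
          (fun q => pvBRow c q.1 q.2)).length := by
        simp [PySem.List.length_enumerate]
        omega
      rw [List.getD_eq_getElem?_getD, List.getElem?_eq_getElem hplen]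
      simp only [List.getElem_map, PySem.List.getElem_enumerate, Option.getD_some]
      have htp : (c.take (p + 1))[p]'(by simp; omega) = c.getD p [] := by
        rw [List.getElem_take]
        simp [List.getD_eq_getElem?_getD, List.getElem?_eq_getElem (show p < c.length by omega)]
      rw [htp]
      norm_num
    rw [hRL]
    have hbne : ((((p + 1 : Nat) : Nat) : Int) == 0) = false := by
      simp only [beq_eq_false_iff_ne, ne_eq]
      push_cast; omega
    have hb2 : pvBRow c (((p + 1 : Nat) : Nat) : Int) (c.getD (p + 1) []) =
        (PySem.List.pyRange 0 ((c.getD (p + 1) []).length : Int) 1).map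
          (fun j => PySem.Int.mod (pvPref c j (((p + 1 : Nat) : Nat) : Int)) 256) := by
      rw [pvBRow_eq, hbne]; simp
    rw [hb2]
    apply List.map_congr_left
    intro j hj
    rw [PySem.List.mem_pyRange_one] at hj
    exact step_cell c p (pre_adj c hpre p hm) j hj.1 hj.2

-- prefix invariant of A's outer loop
lemma a_prefix (c : List (List Int)) (hpre : Pre_filter_1 c) (k : Nat) (hk : k ≤ c.length) :
    (PySem.List.pyRange 0 (k : Int) 1).foldl (fun result_line i =>
      let result_pixel :=
        (PySem.List.pyRange 0 ((PySem.List.pyGetD c i []).length : Int) 1).foldl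
          (fun rp j =>
            if i > 0 then
              rp ++ [PySem.Int.mod
                (PySem.List.pyGetD (PySem.List.pyGetD c i []) j 0 +
                 PySem.List.pyGetD (PySem.List.pyGetD result_line (i - 1) []) j 0) 256]
            else
              rp ++ [PySem.List.pyGetD (PySem.List.pyGetD c i []) j 0]) []
      result_line ++ [result_pixel]) [] =
    (PySem.List.enumerate (c.take k)).map (fun p => pvBRow c p.1 p.2) := by
  induction k with
  | zero => simp [PySem.List.pyRange_zero_nat]
  | succ m ih =>
    have hm : m < c.length := hk
    have hsplit : PySem.List.pyRange 0 ((m + 1 : Nat) : Int) 1 =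
        PySem.List.pyRange 0 (m : Int) 1 ++ [(m : Int)] := by
      push_cast
      exact PySem.List.pyRange_one_succ_right (by positivity)
    rw [hsplit, List.foldl_append, ih (Nat.le_of_lt hm)]
    have htake : c.take (m + 1) = c.take m ++ [c.getD m []] := by
      rw [List.take_add_one, List.getElem?_eq_getElem hm]
      simp [List.getD_eq_getElem?_getD, List.getElem?_eq_getElem hm]
    rw [htake, PySem.List.enumerate_append, List.map_append]
    simp only [List.foldl_cons, List.foldl_nil, PySem.List.enumerate_cons,
      PySem.List.enumerate_nil, List.map_cons, List.map_nil]
    congr 1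
    have hlt : (c.take m).length = m := by simp [Nat.le_of_lt hm]
    rw [hlt]
    have := row_eq c hpre m hm
    rw [this]
    norm_num

-- ===== VERDICT (by name: the statement is the Claim_ definition above) =====
theorem filter_1_spec : Claim_equal_filter_1 := by
  intro current _ hpre
  show filter_1 current = filter_1_alt current
  rw [alt_eq_map, filter_1]
  have := a_prefix current hpre current.length (le_refl _)
  simpa [List.take_length] using this
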